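-- pv_equiv track=rewrite | github.com/ArcticTechnology/SimpleWallet | src/simplewallet/utils/conversion.py | powbase2
-- ===== SOURCE A (Python) =====
-- def powbase2(data, frombits, tobits, pad=True):
-- 	# General power-of-2 base conversion.
-- 	acc = 0
-- 	bits = 0
-- 	ret = []
-- 	maxv = (1 << tobits) - 1
-- 	max_acc = (1 << (frombits + tobits - 1)) - 1
-- 	for value in data:
-- 		if value < 0 or (value >> frombits):
-- 			return None
-- 		acc = ((acc << frombits) | value) & max_acc
-- 		bits += frombits
-- 		while bits >= tobits:
-- 			bits -= tobits
-- 			ret.append((acc >> bits) & maxv)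
-- 	if pad:
-- 		if bits:
-- 			ret.append((acc << (tobits - bits)) & maxv)
-- 	elif bits >= frombits or ((acc << (tobits - bits)) & maxv):
-- 		return None
-- 	return ret
-- ===== SOURCE B (Python) =====
-- def powbase2(data, frombits, tobits, pad=True):
-- 	# Two-phase power-of-2 base conversion: validate+pack all values into one
-- 	# unbounded integer, then slice fixed-width chunks from the MSB side.
-- 	maxv = (1 << tobits) - 1
-- 	acc = 0
-- 	for value in data:
-- 		if value < 0 or (value >> frombits):
-- 			return None
-- 		acc = (acc << frombits) | value
-- 	total = len(data) * frombits
-- 	n = total // tobits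
-- 	ret = [(acc >> (total - (i + 1) * tobits)) & maxv for i in range(n)]
-- 	leftover = total % tobits
-- 	if pad:
-- 		if leftover:
-- 			ret.append((acc << (tobits - leftover)) & maxv)
-- 	elif leftover >= frombits or ((acc << (tobits - leftover)) & maxv):
-- 		return None
-- 	return ret
-- ===== Notes on version B (the rewrite author's own statement) =====
-- stated objective: alternative
-- what changed: Replaces the interleaved accumulate-mask-and-emit loop by two separate phases: one pass packs all validated values into a single unbounded integer (no masking, no inner while), then the output chunks are sliced from the MSB side by a closed-form comprehension over total_bits//tobits, with the pad/validity tail computed from total_bits % tobits; the trade is that the unbounded accumulator makes B's packing cost grow with the bit-length of the whole input.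
-- outside the precondition, e.g. on powbase2([], 1, 0, True): A returns [], B raises ZeroDivisionError
import Mathlib
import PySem

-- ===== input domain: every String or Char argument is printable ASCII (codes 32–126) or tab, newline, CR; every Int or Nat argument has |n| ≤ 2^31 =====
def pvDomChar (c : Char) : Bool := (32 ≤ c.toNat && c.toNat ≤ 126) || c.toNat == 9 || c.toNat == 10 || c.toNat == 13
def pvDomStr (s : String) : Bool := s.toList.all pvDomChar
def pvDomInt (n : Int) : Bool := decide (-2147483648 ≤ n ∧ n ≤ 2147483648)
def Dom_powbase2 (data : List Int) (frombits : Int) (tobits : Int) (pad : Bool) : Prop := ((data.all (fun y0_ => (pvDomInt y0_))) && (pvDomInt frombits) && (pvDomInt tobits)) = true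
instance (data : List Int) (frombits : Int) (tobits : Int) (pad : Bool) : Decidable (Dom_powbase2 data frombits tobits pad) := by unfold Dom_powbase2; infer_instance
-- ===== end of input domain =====

-- B re-implements the conversion in two phases (pack all values into one unbounded
-- integer, then slice chunks from the MSB side) instead of A's interleaved
-- accumulate-mask-and-emit loop; equivalence is proved on Pre_ (return value only,
-- neither program mutates its arguments).

-- ===== PORT A =====
-- inner 'while bits >= tobits' loop of A; the extra '0 < tobits' conjunct is only a
-- totality guard (Python diverges when tobits ≤ 0; Pre_ admits tobits ≤ 0 only where
-- A returns None before this loop is ever entered).  '<<' '>>' are Lean's '<<<' '>>>' (exact for the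
-- nonnegative shift counts admitted by Pre_; Python raises on negative ones),
-- '&' '|' are PySem.Int.band/bor.
def pbDrain (tobits maxv acc : Int) (bits : Int) (ret : List Int) : List Int × Int :=
  if _h : tobits ≤ bits ∧ 0 < tobits then
    pbDrain tobits maxv acc (bits - tobits)
      (ret ++ [PySem.Int.band (acc >>> (bits - tobits).toNat) maxv])
  else (ret, bits)
termination_by bits.toNat
decreasing_by omega

-- the 'for value in data' loop of A, state (acc, bits, ret); none = 'return None'
def pbLoop (frombits tobits maxv maxAcc : Int) :
    List Int → Int → Int → List Int → Option (Int × Int × List Int)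
  | [], acc, bits, ret => some (acc, bits, ret)
  | v :: rest, acc, bits, ret =>
    if v < 0 || (v >>> frombits.toNat) != 0 then none
    else
      let acc' := PySem.Int.band (PySem.Int.bor (acc <<< frombits.toNat) v) maxAcc
      let p := pbDrain tobits maxv acc' (bits + frombits) ret
      pbLoop frombits tobits maxv maxAcc rest acc' p.2 p.1

def powbase2 (data : List Int) (frombits : Int) (tobits : Int) (pad : Bool) : Option (List Int) :=
  let maxv : Int := (1 <<< tobits.toNat) - 1
  let maxAcc : Int := (1 <<< (frombits + tobits - 1).toNat) - 1
  match pbLoop frombits tobits maxv maxAcc data 0 0 [] with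
  | none => none
  | some (acc, bits, ret) =>
    if pad then
      if bits ≠ 0 then some (ret ++ [PySem.Int.band (acc <<< (tobits - bits).toNat) maxv])
      else some ret
    else if bits ≥ frombits || PySem.Int.band (acc <<< (tobits - bits).toNat) maxv ≠ 0 then none
    else some ret

-- ===== PORT B =====
-- phase 1 of Source B: validate every value and pack the whole input into one integer
def pbPack (frombits : Int) : List Int → Int → Option Int
  | [], acc => some acc
  | v :: rest, acc =>
    if v < 0 || (v >>> frombits.toNat) != 0 then none
    else pbPack frombits rest (PySem.Int.bor (acc <<< frombits.toNat) v)

def powbase2_alt (data : List Int) (frombits : Int) (tobits : Int) (pad : Bool) : Option (List Int) :=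
  let maxv : Int := (1 <<< tobits.toNat) - 1
  match pbPack frombits data 0 with
  | none => none
  | some acc =>
    let total := (data.length : Int) * frombits
    let n := PySem.Int.floordiv total tobits
    let ret := (PySem.List.pyRange 0 n 1).map
      (fun i => PySem.Int.band (acc >>> (total - (i + 1) * tobits).toNat) maxv)
    let leftover := PySem.Int.mod total tobits
    if pad then
      if leftover ≠ 0 then some (ret ++ [PySem.Int.band (acc <<< (tobits - leftover).toNat) maxv])
      else some ret
    else if leftover ≥ frombits || PySem.Int.band (acc <<< (tobits - leftover).toNat) maxv ≠ 0 then none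
    else some ret

-- ===== PRECONDITION & SPEC =====
-- Pre_ excludes the inputs on which A raises on a negative shift count or loops
-- forever (tobits ≤ 0 or frombits < 0, except where A stops first: a negative first
-- value or empty data) — and with them the degenerate empty-data tobits = 0 inputs
-- where A returns [] but B's chunk-count division by tobits raises ZeroDivisionError.
def Pre_powbase2 (data : List Int) (frombits : Int) (tobits : Int) (pad : Bool) : Prop :=
  (1 ≤ tobits ∧
    (0 ≤ frombits ∨ (1 ≤ frombits + tobits ∧ (data = [] ∨ data.headD 0 < 0)))) ∨
  (tobits = 0 ∧ 1 ≤ frombits ∧ data.headD 0 < 0)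
instance (data : List Int) (frombits : Int) (tobits : Int) (pad : Bool) : Decidable (Pre_powbase2 data frombits tobits pad) := by unfold Pre_powbase2; infer_instance

def pvWitness_powbase2 : List Int × Int × Int × Bool := ([3, 1], 2, 5, true)

def Spec_powbase2 (data : List Int) (frombits : Int) (tobits : Int) (pad : Bool) (out : Option (List Int)) : Prop := out = powbase2_alt data frombits tobits pad
instance (data : List Int) (frombits : Int) (tobits : Int) (pad : Bool) (out : Option (List Int)) : Decidable (Spec_powbase2 data frombits tobits pad out) := by unfold Spec_powbase2; infer_instance

-- ===== CLAIM (what is proved, stated in full; the proofs are below) =====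
def Claim_equal_powbase2 : Prop := ∀ (data : List Int) (frombits : Int) (tobits : Int) (pad : Bool), Dom_powbase2 data frombits tobits pad → Pre_powbase2 data frombits tobits pad → Spec_powbase2 data frombits tobits pad (powbase2 data frombits tobits pad)

-- ===== LEMMAS AND PROOFS =====

-- Nat-level model: pack the valid values into one Nat
def pbPackN (F : Nat) : List Int → Nat → Option Nat
  | [], a => some a
  | v :: rest, a => if 0 ≤ v ∧ v < 2 ^ F then pbPackN F rest (a * 2 ^ F + v.toNat) else none

-- the chunks that `total` packed bits yield
def pbChunks (a : Nat) (total : Nat) (T : Nat) : List Int :=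
  (List.range (total / T)).map (fun i => ((a / 2 ^ (total - (i + 1) * T) % 2 ^ T : Nat) : Int))

lemma test_false_iff (v : Int) (F : Nat) :
    (v < 0 || (v >>> F) != 0) = false ↔ 0 ≤ v ∧ v < 2 ^ F := by
  simp only [Bool.or_eq_false_iff, decide_eq_false_iff_not, bne_eq_false_iff_eq, not_lt]
  have h2p : (0:Int) < 2 ^ F := by positivity
  rw [Int.shiftRight_eq_div_pow]
  push_cast
  constructor
  · rintro ⟨h1, h2⟩
    have hd := Int.mul_ediv_add_emod v (2 ^ F)
    rw [h2, mul_zero] at hd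
    have hm := Int.emod_lt_of_pos v h2p
    exact ⟨h1, by omega⟩
  · rintro ⟨h1, h2⟩
    exact ⟨h1, Int.ediv_eq_zero_of_lt h1 h2⟩

lemma shr_cast (x k : Nat) : (x : Int) >>> k = ((x / 2 ^ k : Nat) : Int) := by
  rw [Int.shiftRight_eq_div_pow]
  exact_mod_cast (Int.natCast_ediv x (2 ^ k)).symm

lemma band_mask (x T : Nat) : PySem.Int.band (x : Int) ((2 ^ T : Int) - 1) = ((x % 2 ^ T : Nat) : Int) := by
  have h1 : ((2 ^ T : Int) - 1) = ((2 ^ T - 1 : Nat) : Int) := by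
    have := Nat.one_le_two_pow (n := T); push_cast [this]; ring
  rw [h1, PySem.Int.band_natCast, Nat.and_two_pow_sub_one_eq_mod]

lemma bor_pack (a vN F : Nat) (hv : vN < 2 ^ F) :
    PySem.Int.bor ((a : Int) <<< F) (vN : Int) = ((a * 2 ^ F + vN : Nat) : Int) := by
  rw [Int.shiftLeft_eq]
  have h1 : (a : Int) * 2 ^ F = ((a * 2 ^ F : Nat) : Int) := by push_cast; ring
  rw [h1, PySem.Int.bor_natCast]
  rw [Nat.mul_comm] at *
  rw [← Nat.two_pow_add_eq_or_of_lt hv a]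

-- masking to W ≥ p + T bits does not change the chunk at position p
lemma mask_chunk (x W p T : Nat) (h : p + T ≤ W) :
    x % 2 ^ W / 2 ^ p % 2 ^ T = x / 2 ^ p % 2 ^ T := by
  obtain ⟨d, rfl⟩ : ∃ d, W = p + (T + d) := ⟨W - p - T, by omega⟩
  rw [pow_add, Nat.mod_mul_right_div_self, Nat.mod_mod_of_dvd _ (pow_dvd_pow 2 (by omega))]

-- masking to W ≥ T - s bits does not change (x << s) & (2^T - 1)
lemma mask_shl (x s T W : Nat) (hs : s ≤ T) (h : T - s ≤ W) :
    x % 2 ^ W * 2 ^ s % 2 ^ T = x * 2 ^ s % 2 ^ T := by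
  have h1 : (2:Nat) ^ T = 2 ^ (T - s) * 2 ^ s := by rw [← pow_add]; congr 1; omega
  rw [h1, Nat.mul_mod_mul_right, Nat.mul_mod_mul_right,
    Nat.mod_mod_of_dvd _ (pow_dvd_pow 2 h)]

lemma mod_step (a c d w : Nat) : (a % w * c + d) % w = (a * c + d) % w := by
  conv_lhs => rw [Nat.add_mod, Nat.mod_mul_mod, ← Nat.add_mod]

-- appending F fresh low bits extends the chunk list by the newly completed chunks
lemma chunks_snoc (a vN F T m : Nat) (hT : 0 < T) (hv : vN < 2 ^ F) :
    pbChunks (a * 2 ^ F + vN) (m + F) T =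
      pbChunks a m T ++ (List.range ((m % T + F) / T)).map
        (fun j => (((a * 2 ^ F + vN) / 2 ^ (m % T + F - (j + 1) * T) % 2 ^ T : Nat) : Int)) := by
  unfold pbChunks
  have hdm : T * (m / T) + m % T = m := Nat.div_add_mod m T
  have hsplit : (m + F) / T = m / T + (m % T + F) / T := by
    have h1 : m + F = T * (m / T) + (m % T + F) := by omega
    rw [h1, Nat.mul_add_div hT]
  rw [hsplit, List.range_add, List.map_append, List.map_map]
  congr 1
  · apply List.map_congr_left
    intro i hi
    rw [List.mem_range] at hi
    have hle : (i + 1) * T ≤ m := by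
      calc (i + 1) * T ≤ m / T * T := Nat.mul_le_mul_right T hi
      _ ≤ m := Nat.div_mul_le_self m T
    have he : m + F - (i + 1) * T = (m - (i + 1) * T) + F := by omega
    have hx : (a * 2 ^ F + vN) / 2 ^ (m + F - (i + 1) * T) = a / 2 ^ (m - (i + 1) * T) := by
      rw [he, pow_add, Nat.mul_comm (2 ^ (m - (i + 1) * T)) (2 ^ F), ← Nat.div_div_eq_div_mul,
        Nat.mul_comm a, Nat.mul_add_div (by positivity : 0 < 2 ^ F), Nat.div_eq_of_lt hv,
        Nat.add_zero]
    rw [hx]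
  · apply List.map_congr_left
    intro j hj
    rw [List.mem_range] at hj
    simp only [Function.comp]
    have h1 : (m / T + j + 1) * T = T * (m / T) + (j + 1) * T := by ring
    have he : m + F - (m / T + j + 1) * T = m % T + F - (j + 1) * T := by omega
    rw [he]

lemma pbDrain_eq (T : Nat) (hT : 0 < T) (aN : Nat) : ∀ (b : Nat) (ret : List Int),
    pbDrain (T : Int) ((2 ^ T : Int) - 1) (aN : Int) (b : Int) ret =
      (ret ++ (List.range (b / T)).map
          (fun j => ((aN / 2 ^ (b - (j + 1) * T) % 2 ^ T : Nat) : Int)),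
        ((b % T : Nat) : Int)) := by
  intro b
  induction b using Nat.strong_induction_on with
  | _ b ih =>
    intro ret
    rw [pbDrain]
    by_cases hb : T ≤ b
    · rw [dif_pos ⟨by exact_mod_cast hb, by exact_mod_cast hT⟩]
      have hc : ((b : Int) - (T : Int)) = ((b - T : Nat) : Int) := by omega
      rw [hc, Int.toNat_natCast, shr_cast, band_mask]
      rw [ih (b - T) (by omega)]
      have hb' : b = (b - T) + T := by omega
      have hq : b / T = (b - T) / T + 1 := by
        conv_lhs => rw [hb']
        rw [Nat.add_div_right _ hT]
      have hmod : b % T = (b - T) % T := by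
        conv_lhs => rw [hb']
        rw [Nat.add_mod_right]
      rw [Prod.mk.injEq]
      refine ⟨?_, by rw [hmod]⟩
      rw [hq, List.range_succ_eq_map, List.map_cons, List.map_map, List.append_assoc,
        List.singleton_append]
      congr 1
      · simp
        intro j hj
        rw [show b - T - (j + 1) * T = b - (j + 1 + 1) * T by
          have h1 : (j + 1 + 1) * T = (j + 1) * T + T := by ring
          omega]
    · rw [dif_neg (by omega)]
      have hq : b / T = 0 := Nat.div_eq_of_lt (by omega)
      have hm : b % T = b := Nat.mod_eq_of_lt (by omega)
      rw [hq, hm]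
      simp

lemma pbPack_eq (F : Nat) : ∀ (data : List Int) (aN : Nat),
    pbPack (F : Int) data (aN : Int) = Option.map (fun (n : Nat) => (n : Int)) (pbPackN F data aN) := by
  intro data
  induction data with
  | nil => intro aN; simp [pbPack, pbPackN]
  | cons v rest ih =>
    intro aN
    rw [pbPack, pbPackN, Int.toNat_natCast]
    by_cases hv : (v < 0 || (v >>> F) != 0) = true
    · rw [if_pos hv, if_neg (fun hp => by
        have := (test_false_iff v F).mpr hp
        rw [this] at hv
        exact Bool.false_ne_true hv)]
      simp
    · have hb : (v < 0 || (v >>> F) != 0) = false := by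
        cases h : (v < 0 || (v >>> F) != 0) <;> simp_all
      obtain ⟨h0, hlt⟩ := (test_false_iff v F).mp hb
      rw [if_neg (by simp [hb]), if_pos ⟨h0, hlt⟩]
      have hvN : v = ((v.toNat : Nat) : Int) := (Int.toNat_of_nonneg h0).symm
      have hlt' : v.toNat < 2 ^ F := by
        have h2 : ((2 ^ F : Nat) : Int) = 2 ^ F := by push_cast; ring
        omega
      conv_lhs => rw [hvN, bor_pack aN v.toNat F hlt']
      exact ih _

lemma pbLoop_eq (F T W : Nat) (hT : 0 < T) (hW : F + T ≤ W + 1) :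
    ∀ (data : List Int) (aN m : Nat),
    pbLoop (F : Int) (T : Int) ((2 ^ T : Int) - 1) ((2 ^ W : Int) - 1) data
        ((aN % 2 ^ W : Nat) : Int) ((m % T : Nat) : Int) (pbChunks aN m T) =
      (pbPackN F data aN).map (fun a' =>
        (((a' % 2 ^ W : Nat) : Int), (((m + data.length * F) % T : Nat) : Int),
          pbChunks a' (m + data.length * F) T)) := by
  intro data
  induction data with
  | nil => intro aN m; simp [pbLoop, pbPackN]
  | cons v rest ih =>
    intro aN m
    rw [pbLoop.eq_def]
    simp only [Int.toNat_natCast]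
    rw [pbPackN]
    by_cases hv : (v < 0 || (v >>> F) != 0) = true
    · rw [if_pos hv, if_neg (fun hp => by
        have := (test_false_iff v F).mpr hp
        rw [this] at hv
        exact Bool.false_ne_true hv)]
      simp
    · have hb : (v < 0 || (v >>> F) != 0) = false := by
        cases h : (v < 0 || (v >>> F) != 0) <;> simp_all
      obtain ⟨h0, hlt⟩ := (test_false_iff v F).mp hb
      have hvN : v = ((v.toNat : Nat) : Int) := (Int.toNat_of_nonneg h0).symm
      have hlt' : v.toNat < 2 ^ F := by
        have h2 : ((2 ^ F : Nat) : Int) = 2 ^ F := by push_cast; ring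
        omega
      rw [if_neg (by simp [hb]), if_pos ⟨h0, hlt⟩]
      have hacc : PySem.Int.band (PySem.Int.bor (((aN % 2 ^ W : Nat) : Int) <<< F) v)
          ((2 ^ W : Int) - 1) = (((aN * 2 ^ F + v.toNat) % 2 ^ W : Nat) : Int) := by
        conv_lhs => rw [hvN, bor_pack _ _ _ hlt']
        rw [band_mask, mod_step]
      have hbits : ((m % T : Nat) : Int) + (F : Int) = ((m % T + F : Nat) : Int) := by
        push_cast; ring
      rw [hacc, hbits, pbDrain_eq T hT _ (m % T + F) _]
      simp only
      have hmt : m % T < T := Nat.mod_lt m hT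
      have hmask : (List.range ((m % T + F) / T)).map
            (fun j => ((((aN * 2 ^ F + v.toNat) % 2 ^ W) / 2 ^ (m % T + F - (j + 1) * T) % 2 ^ T : Nat) : Int))
          = (List.range ((m % T + F) / T)).map
            (fun j => (((aN * 2 ^ F + v.toNat) / 2 ^ (m % T + F - (j + 1) * T) % 2 ^ T : Nat) : Int)) := by
        apply List.map_congr_left
        intro j hj
        rw [List.mem_range] at hj
        have hle : (j + 1) * T ≤ m % T + F := by
          calc (j + 1) * T ≤ (m % T + F) / T * T := Nat.mul_le_mul_right T hj
          _ ≤ m % T + F := Nat.div_mul_le_self _ T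
        have hTle : T ≤ (j + 1) * T := by
          calc T = 1 * T := (one_mul T).symm
          _ ≤ (j + 1) * T := Nat.mul_le_mul_right T (by omega)
        rw [mask_chunk _ W _ T (by omega)]
      rw [hmask, ← chunks_snoc aN v.toNat F T m hT hlt', Nat.mod_add_mod]
      have htot : m + F + rest.length * F = m + (v :: rest).length * F := by
        simp [List.length_cons]; ring
      have := ih (aN * 2 ^ F + v.toNat) (m + F)
      rw [htot] at this
      exact this

-- ===== VERDICT (by name: the statement is the Claim_ definition above) =====
lemma powbase2_eq_case1 (data : List Int) (f t : Int) (pad : Bool)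
    (hf : 0 ≤ f) (ht : 1 ≤ t) :
    powbase2 data f t pad = powbase2_alt data f t pad := by
  have hfF : f = (f.toNat : Int) := by omega
  have htT : t = (t.toNat : Int) := by omega
  rw [hfF, htT]
  generalize f.toNat = F at *
  generalize t.toNat = T at *
  have hTpos : 0 < T := by omega
  have hW : F + T ≤ (F + T - 1) + 1 := by omega
  simp only [powbase2, powbase2_alt, Int.toNat_natCast]
  have hmaxv : (((1 <<< T : Nat) : Int)) - 1 = (2 ^ T : Int) - 1 := by
    rw [Nat.one_shiftLeft]; push_cast; ring
  have hmaxacc : (((1 <<< (((F : Int) + (T : Int) - 1)).toNat : Nat) : Int)) - 1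
      = (2 ^ (F + T - 1) : Int) - 1 := by
    rw [show (((F : Int) + (T : Int) - 1)).toNat = F + T - 1 by omega, Nat.one_shiftLeft]
    push_cast; ring
  simp only [hmaxv, hmaxacc]
  have hloop := pbLoop_eq F T (F + T - 1) hTpos hW data 0 0
  have hch0 : pbChunks 0 0 T = [] := by simp [pbChunks]
  rw [hch0] at hloop
  simp only [Nat.zero_mod, Nat.cast_zero, zero_add] at hloop
  have hpack := pbPack_eq F data 0
  rw [Nat.cast_zero] at hpack
  cases h : pbPackN F data 0 with
  | none =>
    rw [h] at hloop hpack
    rw [hloop, hpack]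
    rfl
  | some a' =>
    rw [h, Option.map_some] at hloop hpack
    rw [hloop, hpack]
    dsimp only
    set N := data.length * F with hN
    have htotal : (data.length : Int) * (F : Int) = (N : Int) := by push_cast [hN]; ring
    simp only [htotal, PySem.Int.floordiv_natCast N T, PySem.Int.mod_natCast N T]
    have hretB : (PySem.List.pyRange 0 ((N / T : Nat) : Int) 1).map
        (fun i => PySem.Int.band (((a' : Nat) : Int) >>> (((N : Nat) : Int) - (i + 1) * ((T : Nat) : Int)).toNat)
          ((2 ^ T : Int) - 1)) = pbChunks a' N T := by
      rw [PySem.List.pyRange_one]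
      rw [List.map_map]
      unfold pbChunks
      apply List.map_congr_left
      intro k hk
      rw [List.mem_range] at hk
      have hkN : k < N / T := by
        have : ((((N / T : Nat) : Int)) - 0).toNat = N / T := by omega
        omega
      have hle : (k + 1) * T ≤ N := by
        calc (k + 1) * T ≤ N / T * T := Nat.mul_le_mul_right T hkN
        _ ≤ N := Nat.div_mul_le_self N T
      simp only [Function.comp, zero_add]
      have hc : (((N : Nat) : Int) - ((k : Int) + 1) * ((T : Nat) : Int)).toNat = N - (k + 1) * T := by
        have hcast : (((k + 1) * T : Nat) : Int) = ((k : Int) + 1) * ((T : Nat) : Int) := by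
          push_cast; ring
        omega
      rw [hc, shr_cast, band_mask]
    simp only [hretB]
    have hNT : N % T < T := Nat.mod_lt _ hTpos
    have hts : (((T : Nat) : Int) - ((N % T : Nat) : Int)).toNat = T - N % T := by omega
    simp only [hts]
    have hpadeq : PySem.Int.band (((a' % 2 ^ (F + T - 1) : Nat) : Int) <<< (T - N % T)) ((2 ^ T : Int) - 1)
        = PySem.Int.band (((a' : Nat) : Int) <<< (T - N % T)) ((2 ^ T : Int) - 1) := by
      rw [Int.shiftLeft_eq, Int.shiftLeft_eq]
      have c1 : (((a' % 2 ^ (F + T - 1) : Nat) : Int)) * 2 ^ (T - N % T)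
          = (((a' % 2 ^ (F + T - 1)) * 2 ^ (T - N % T) : Nat) : Int) := by push_cast; ring
      have c2 : (((a' : Nat) : Int)) * 2 ^ (T - N % T)
          = ((a' * 2 ^ (T - N % T) : Nat) : Int) := by push_cast; ring
      rw [c1, c2, band_mask, band_mask,
        mask_shl a' (T - N % T) T (F + T - 1) (by omega) (by omega)]
    simp only [hpadeq]

-- a negative first value makes both programs return None before any shift happens
lemma powbase2_neg_head (v : Int) (rest : List Int) (f t : Int) (pad : Bool) (hv : v < 0) :
    powbase2 (v :: rest) f t pad = powbase2_alt (v :: rest) f t pad := by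
  simp [powbase2, powbase2_alt, pbLoop, pbPack, hv]

lemma powbase2_nil (f t : Int) (pad : Bool) (htpos : (0 : Int) < t) :
    powbase2 [] f t pad = powbase2_alt [] f t pad := by
  simp only [powbase2, powbase2_alt, pbLoop, pbPack]
  rw [PySem.Int.floordiv_eq_ediv_of_pos htpos, PySem.Int.mod_eq_emod_of_pos htpos]
  norm_num

theorem powbase2_spec : Claim_equal_powbase2 := by
  intro data f t pad hdom hpre
  unfold Spec_powbase2
  rcases hpre with ⟨ht, hf | ⟨hft, hnil | hhead⟩⟩ | ⟨ht0, hf1, hhead⟩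
  · exact powbase2_eq_case1 data f t pad hf ht
  · subst hnil
    exact powbase2_nil f t pad (by omega)
  · cases data with
    | nil => simp at hhead
    | cons v rest => exact powbase2_neg_head v rest f t pad (by simpa using hhead)
  · cases data with
    | nil => simp at hhead
    | cons v rest => exact powbase2_neg_head v rest f t pad (by simpa using hhead)
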